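-- pv_equiv track=rewrite | github.com/tommasoc80/EventStoryLine | baseline_PPMI1.py | sentence_coocc
-- ===== SOURCE A (Python) =====
-- import collections
-- from itertools import combinations, permutations, product
--
-- def sentence_coocc(event_lemma_dict, event_same_sentence):
--     """
--     funtion create pairs of events in the same sentence - same sentence event pairs
--     :param event_same_sentence: dictionary with list of event markable co-ccurring in same sentence
--     :param event_lemma_dict: dictionary of event ids and lemmas in file
--     :return: counter dictionary of event pairs in the same sentence
--     """
--
--     same_sentence_event_lemma = collections.defaultdict(list)
--     pairs_circumstantial_sentence = {}
--
--     for k, v in event_lemma_dict.items():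
--         for k1, v1 in event_same_sentence.items():
--             if k in v1:
--                 event_string = "_".join(v)
--                 same_sentence_event_lemma[k1].append(event_string)
--
--     for k, v in same_sentence_event_lemma.items():
--         if len(v) >= 2:
--             same_sent_pairs = list(product(v, repeat=2))
--             pairs_circumstantial_sentence[k] = same_sent_pairs
--
--     return pairs_circumstantial_sentence
-- ===== SOURCE B (Python) =====
-- def sentence_coocc(event_lemma_dict, event_same_sentence):
--     # Reverse index event_id -> sentence keys containing it (one entry per sentence,
--     # in sentence order); replaces A's inner scan over all sentences per event.
--     ix = {}
--     for k1, v1 in event_same_sentence.items():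
--         for e in dict.fromkeys(v1):
--             ix.setdefault(e, []).append(k1)
--     grouped = {}
--     for k, v in event_lemma_dict.items():
--         s = "_".join(v)
--         for k1 in ix.get(k, ()):
--             grouped.setdefault(k1, []).append(s)
--     return {k: [(x, y) for x in v for y in v] for k, v in grouped.items() if len(v) >= 2}
-- ===== Notes on version B (the rewrite author's own statement) =====
-- stated objective: faster
-- what changed: B builds a reverse index event_id->sentence keys once, so each event looks up its sentences directly instead of scanning every sentence's event list for membership as A does.
import Mathlib
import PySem

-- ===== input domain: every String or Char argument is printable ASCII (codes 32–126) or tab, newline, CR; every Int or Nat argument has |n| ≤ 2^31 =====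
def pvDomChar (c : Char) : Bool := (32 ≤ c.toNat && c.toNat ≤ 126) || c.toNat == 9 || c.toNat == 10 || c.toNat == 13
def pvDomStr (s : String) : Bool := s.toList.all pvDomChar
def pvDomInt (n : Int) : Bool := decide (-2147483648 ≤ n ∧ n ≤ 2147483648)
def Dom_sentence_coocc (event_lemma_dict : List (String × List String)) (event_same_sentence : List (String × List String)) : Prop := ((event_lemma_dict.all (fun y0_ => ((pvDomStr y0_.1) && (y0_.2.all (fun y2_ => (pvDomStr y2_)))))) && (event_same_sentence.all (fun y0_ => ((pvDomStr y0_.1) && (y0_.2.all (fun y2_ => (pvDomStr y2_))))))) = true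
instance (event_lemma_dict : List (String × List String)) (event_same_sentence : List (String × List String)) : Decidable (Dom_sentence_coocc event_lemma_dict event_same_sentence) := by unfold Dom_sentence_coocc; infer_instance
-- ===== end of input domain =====

-- B replaces A's per-event scan over every sentence's event list by a reverse index
-- event_id → sentence keys built once (objective: faster, asymptotic).

-- ===== PORT A =====
def sentence_coocc (event_lemma_dict : List (String × List String)) (event_same_sentence : List (String × List String)) : List (String × List (String × String)) :=
  -- same_sentence_event_lemma = defaultdict(list); d[k1].append(x) is modify k1 [] (· ++ [x])
  let ssel : PySem.Dict String (List String) :=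
    event_lemma_dict.foldl (fun d kv =>
      event_same_sentence.foldl (fun d kv1 =>
        if kv1.2.contains kv.1 then
          d.modify kv1.1 [] (· ++ [PySem.Str.join "_" kv.2])
        else d) d) PySem.Dict.empty
  -- second loop: pairs_circumstantial_sentence[k] = list(product(v, repeat=2)) when len(v) >= 2
  let pairs : PySem.Dict String (List (String × String)) :=
    ssel.items.foldl (fun r kv =>
      if 2 ≤ kv.2.length then
        r.insert kv.1 (kv.2.flatMap (fun x => kv.2.map (fun y => (x, y))))
      else r) PySem.Dict.empty
  pairs.items

-- ===== PORT B =====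
def sentence_coocc_alt (event_lemma_dict : List (String × List String)) (event_same_sentence : List (String × List String)) : List (String × List (String × String)) :=
  -- ix: reverse index; dict.fromkeys(v1) is PySem.List.dedup; setdefault(..).append is modify
  let ix : PySem.Dict String (List String) :=
    event_same_sentence.foldl (fun ix kv1 =>
      (PySem.List.dedup kv1.2).foldl (fun ix e => ix.modify e [] (· ++ [kv1.1])) ix)
      PySem.Dict.empty
  let grouped : PySem.Dict String (List String) :=
    event_lemma_dict.foldl (fun g kv =>
      let s := PySem.Str.join "_" kv.2
      (ix.getD kv.1 []).foldl (fun g k1 => g.modify k1 [] (· ++ [s])) g)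
      PySem.Dict.empty
  -- final dict comprehension over grouped (distinct keys): filter + map, in order
  (grouped.items.filter (fun kv => 2 ≤ kv.2.length)).map
    (fun kv => (kv.1, kv.2.flatMap (fun x => kv.2.map (fun y => (x, y)))))

-- ===== PRECONDITION & SPEC =====
def Spec_sentence_coocc (event_lemma_dict : List (String × List String)) (event_same_sentence : List (String × List String)) (out : List (String × List (String × String))) : Prop := out = sentence_coocc_alt event_lemma_dict event_same_sentence
instance (event_lemma_dict : List (String × List String)) (event_same_sentence : List (String × List String)) (out : List (String × List (String × String))) : Decidable (Spec_sentence_coocc event_lemma_dict event_same_sentence out) := by unfold Spec_sentence_coocc; infer_instance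

-- ===== CLAIM (what is proved, stated in full; the proofs are below) =====
def Claim_equal_sentence_coocc : Prop := ∀ (event_lemma_dict : List (String × List String)) (event_same_sentence : List (String × List String)), Dom_sentence_coocc event_lemma_dict event_same_sentence → Spec_sentence_coocc event_lemma_dict event_same_sentence (sentence_coocc event_lemma_dict event_same_sentence)

-- ===== LEMMAS AND PROOFS =====

-- a Nodup list filtered for equality with k is [k] or []
theorem filter_beq_of_nodup (l : List String) (k : String) (h : l.Nodup) :
    l.filter (fun e => e == k) = if k ∈ l then [k] else [] := by
  induction l with
  | nil => simp
  | cons a t ih =>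
    simp only [List.nodup_cons] at h
    by_cases hak : a = k
    · subst hak
      have ht : t.filter (fun e => e == a) = [] :=
        List.filter_eq_nil_iff.mpr (fun e he => by
          simp only [beq_iff_eq]; exact fun hek => h.1 (hek ▸ he))
      simp [ht]
    · simp [hak, ih h.2, List.mem_cons, Ne.symm hak]

-- one sentence item's effect on the reverse index, at key k
theorem ix_step_getD (v1 : List String) (k1 : String) (ix : PySem.Dict String (List String)) (k : String) :
    ((PySem.List.dedup v1).foldl (fun ix e => ix.modify e [] (· ++ [k1])) ix).getD k []
      = ix.getD k [] ++ (if v1.contains k then [k1] else []) := by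
  have hmap : (PySem.List.dedup v1).foldl (fun ix e => ix.modify e [] (· ++ [k1])) ix
      = ((PySem.List.dedup v1).map (fun e => (e, k1))).foldl (fun d p => d.modify p.1 [] (· ++ [p.2])) ix := by
    rw [List.foldl_map]
  rw [hmap, PySem.Dict.getD_foldl_modify_append]
  congr 1
  rw [List.filter_map]
  have : ((fun p => p.1 == k) ∘ fun e => (e, k1)) = (fun e => e == k) := rfl
  rw [this, filter_beq_of_nodup _ k (PySem.List.nodup_dedup v1)]
  by_cases hk : k ∈ v1
  · simp [hk]
  · simp [hk]

-- the reverse index at key k lists exactly the sentence keys whose value contains k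
theorem ix_getD (ess : List (String × List String)) (ix : PySem.Dict String (List String)) (k : String) :
    (ess.foldl (fun ix kv1 => (PySem.List.dedup kv1.2).foldl (fun ix e => ix.modify e [] (· ++ [kv1.1])) ix) ix).getD k []
      = ix.getD k [] ++ (ess.filter (fun p => p.2.contains k)).map (·.1) := by
  induction ess generalizing ix with
  | nil => simp
  | cons p t ih =>
    simp only [List.foldl_cons, List.filter_cons]
    rw [ih, ix_step_getD]
    by_cases hk : k ∈ p.2
    · simp [hk]
    · simp [hk]

-- A's inner scan over all sentences = B's walk over the reverse-index entry
theorem inner_eq (ess : List (String × List String)) (k s : String) (d : PySem.Dict String (List String)) :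
    ess.foldl (fun d kv1 => if kv1.2.contains k then d.modify kv1.1 [] (· ++ [s]) else d) d
      = ((ess.filter (fun p => p.2.contains k)).map (·.1)).foldl (fun d k1 => d.modify k1 [] (· ++ [s])) d := by
  rw [List.foldl_map, List.foldl_filter]

-- the two grouping dicts coincide
theorem ssel_eq_grouped (eld ess : List (String × List String)) :
    (eld.foldl (fun d kv =>
        ess.foldl (fun d kv1 =>
          if kv1.2.contains kv.1 then d.modify kv1.1 [] (· ++ [PySem.Str.join "_" kv.2]) else d) d)
      PySem.Dict.empty)
    = (eld.foldl (fun g kv =>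
        let s := PySem.Str.join "_" kv.2
        (((ess.foldl (fun ix kv1 => (PySem.List.dedup kv1.2).foldl (fun ix e => ix.modify e [] (· ++ [kv1.1])) ix) PySem.Dict.empty)).getD kv.1 []).foldl
          (fun g k1 => g.modify k1 [] (· ++ [s])) g)
      PySem.Dict.empty) := by
  apply PySem.List.foldl_congr_mem
  intro d kv _
  rw [inner_eq, ix_getD]
  simp

-- any fold of list-valued modifies keeps the key list Nodup
theorem nodup_keys_grouped (eld : List (String × List String))
    (f : String × List String → List String) (s : String × List String → String)
    (g : PySem.Dict String (List String)) (h : g.keys.Nodup) :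
    (eld.foldl (fun g kv => (f kv).foldl (fun g k1 => g.modify k1 [] (· ++ [s kv])) g) g).keys.Nodup := by
  induction eld generalizing g with
  | nil => exact h
  | cons kv t ih =>
    simp only [List.foldl_cons]
    exact ih _ (PySem.Dict.nodup_keys_foldl_modify_key (f kv) id [] (fun _ _ => (· ++ [s kv])) g h)

-- the conditional-insert second pass over a Nodup-keyed items list is filter + map
theorem second_pass (l : List (String × List String))
    (h : (l.map (·.1)).Nodup) :
    (l.foldl (fun r kv =>
        if 2 ≤ kv.2.length then r.insert kv.1 (kv.2.flatMap (fun x => kv.2.map (fun y => (x, y)))) else r)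
      (PySem.Dict.empty : PySem.Dict String (List (String × String)))).items
    = (l.filter (fun kv => 2 ≤ kv.2.length)).map
        (fun kv => (kv.1, kv.2.flatMap (fun x => kv.2.map (fun y => (x, y))))) := by
  have hf : (l.foldl (fun r kv =>
        if 2 ≤ kv.2.length then r.insert kv.1 (kv.2.flatMap (fun x => kv.2.map (fun y => (x, y)))) else r)
      (PySem.Dict.empty : PySem.Dict String (List (String × String))))
      = (l.filter (fun kv => 2 ≤ kv.2.length)).foldl
          (fun r kv => r.insert kv.1 (kv.2.flatMap (fun x => kv.2.map (fun y => (x, y)))))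
          PySem.Dict.empty := by
    rw [List.foldl_filter]
    apply PySem.List.foldl_congr_mem
    intro r kv _
    by_cases h2 : 2 ≤ kv.2.length <;> simp [h2]
  rw [hf]
  have hfresh := PySem.Dict.items_foldl_insert_fresh
      (l.filter (fun kv => decide (2 ≤ kv.2.length)))
      (fun kv => kv.1)
      (fun kv => kv.2.flatMap (fun x => kv.2.map (fun y => (x, y))))
      PySem.Dict.empty
      (fun a _ => PySem.Dict.contains_empty a.1)
      ((List.Sublist.map (fun kv : String × List String => kv.1)
          (List.filter_sublist (l := l) (p := fun kv => decide (2 ≤ kv.2.length)))).nodup h)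
  simpa using hfresh

-- ===== VERDICT (by name: the statement is the Claim_ definition above) =====
theorem sentence_coocc_spec : Claim_equal_sentence_coocc := by
  intro eld ess _
  show sentence_coocc eld ess = sentence_coocc_alt eld ess
  unfold sentence_coocc sentence_coocc_alt
  rw [ssel_eq_grouped]
  apply second_pass
  have := nodup_keys_grouped eld
    (fun kv => ((ess.foldl (fun ix kv1 => (PySem.List.dedup kv1.2).foldl (fun ix e => ix.modify e [] (· ++ [kv1.1])) ix) PySem.Dict.empty)).getD kv.1 [])
    (fun kv => PySem.Str.join "_" kv.2)
    PySem.Dict.empty PySem.Dict.nodup_keys_empty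
  exact this
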